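-- pv_equiv track=rewrite | github.com/karankumbhar47/Lecture_Notes | Sem_V/SemV_Assignments/AI/Q1/word_Conversion_ID-DFS.py | dfs
-- ===== SOURCE A (Python) =====
-- def is_adjacent(word1, word2):
--     diff_count = sum(c1 != c2 for c1, c2 in zip(word1, word2))
--     return diff_count == 1
--
-- def dfs(node, target, dictionary, depth, max_depth, visited, path):
--     if node == target:
--         path.append(node)
--         return path
--
--     if depth == max_depth:
--         return None
--
--     visited.add(node)
--     path.append(node)
--
--     for word in dictionary:
--         if is_adjacent(node, word) and word not in visited:
--             result = dfs(word, target, dictionary, depth + 1, max_depth, visited, path)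
--             if result:
--                 return result
--
--     path.pop()
--     visited.remove(node)
--     return None
-- ===== SOURCE B (Python) =====
-- # B: precomputes an adjacency index over the dictionary once, then runs a pure
-- # recursive search that builds the path suffix functionally (A mutates
-- # visited/path in place; B leaves both arguments untouched -- return values agree).
--
-- def _adjacent(w1, w2):
--     d = 0
--     for c1, c2 in zip(w1, w2):
--         if c1 != c2:
--             d += 1
--             if d > 1:
--                 return False
--     return d == 1
--
--
-- def dfs(node, target, dictionary, depth, max_depth, visited, path):
--     adj = {}
--     for w in dictionary:
--         if w not in adj:
--             adj[w] = [u for u in dictionary if _adjacent(w, u)]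
--
--     def neighbors(w):
--         if w in adj:
--             return adj[w]
--         return [u for u in dictionary if _adjacent(w, u)]
--
--     def search(w, d, vis):
--         if w == target:
--             return [w]
--         if d == max_depth:
--             return None
--         vis = vis | {w}
--         for u in neighbors(w):
--             if u not in vis:
--                 s = search(u, d + 1, vis)
--                 if s is not None:
--                     return [w] + s
--         return None
--
--     s = search(node, depth, set(visited))
--     return None if s is None else list(path) + s
-- ===== Notes on version B (the rewrite author's own statement) =====
-- stated objective: alternative
-- what changed: B precomputes an adjacency index over the dictionary once and then runs a pure recursive search over precomputed neighbour lists, building the path suffix functionally, instead of A's backtracking that re-tests adjacency against the whole dictionary at every expansion and mutates shared visited/path.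
import Mathlib
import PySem

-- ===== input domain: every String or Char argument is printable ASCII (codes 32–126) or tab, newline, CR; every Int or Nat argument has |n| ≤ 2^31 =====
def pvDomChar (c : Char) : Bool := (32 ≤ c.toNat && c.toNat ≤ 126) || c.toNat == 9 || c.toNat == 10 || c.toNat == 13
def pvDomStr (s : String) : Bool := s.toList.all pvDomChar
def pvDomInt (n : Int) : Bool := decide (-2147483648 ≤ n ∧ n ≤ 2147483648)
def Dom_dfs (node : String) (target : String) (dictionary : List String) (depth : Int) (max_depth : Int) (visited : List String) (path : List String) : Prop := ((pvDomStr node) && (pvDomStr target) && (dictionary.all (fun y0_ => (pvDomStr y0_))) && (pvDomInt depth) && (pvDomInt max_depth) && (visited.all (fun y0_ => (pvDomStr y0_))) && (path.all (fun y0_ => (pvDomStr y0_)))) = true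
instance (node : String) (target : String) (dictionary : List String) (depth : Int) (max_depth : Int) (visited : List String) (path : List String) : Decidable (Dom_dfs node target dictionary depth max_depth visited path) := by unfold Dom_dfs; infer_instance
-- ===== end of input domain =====

-- B replaces A's per-expansion dictionary scan and in-place visited/path mutation by a
-- precomputed adjacency index plus a pure suffix-building search; equal return values
-- (A mutates visited/path in place, B leaves its arguments untouched — return value only).



-- measure helper for both searches: number of distinct not-yet-visited words in U
def unvis (U vis : List String) : Nat := (U.toFinset.filter (fun w => w ∉ vis)).card

lemma unvis_cons_of_not_mem (node : String) (D vis : List String) (h : node ∉ vis) :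
    unvis (node :: D) vis = unvis D (vis ++ [node]) + 1 := by
  unfold unvis
  have hset : ((node :: D).toFinset.filter (fun w => w ∉ vis))
      = insert node (D.toFinset.filter (fun w => w ∉ vis ++ [node])) := by
    ext w
    simp only [Finset.mem_filter, Finset.mem_insert, List.mem_toFinset, List.mem_cons,
      List.mem_append]
    constructor
    · rintro ⟨hw | hw, hnv⟩
      · exact Or.inl hw
      · by_cases hwn : w = node
        · exact Or.inl hwn
        · exact Or.inr ⟨hw, by tauto⟩
    · rintro (rfl | ⟨hw, hnv⟩)
      · exact ⟨Or.inl rfl, h⟩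
      · exact ⟨Or.inr hw, by tauto⟩
  rw [hset, Finset.card_insert_of_notMem (by simp)]

lemma unvis_cons_of_mem (node : String) (D vis : List String) (h : node ∈ vis) :
    unvis (node :: D) vis = unvis D vis := by
  unfold unvis
  congr 1
  ext w
  simp only [Finset.mem_filter, List.mem_toFinset, List.mem_cons]
  constructor
  · rintro ⟨hw | hw, hnv⟩
    · exact absurd (hw ▸ h) hnv
    · exact ⟨hw, hnv⟩
  · rintro ⟨hw, hnv⟩; exact ⟨Or.inr hw, hnv⟩

lemma unvis_eq_of_mem_iff (U V vis : List String) (h : ∀ w, w ∈ U ↔ w ∈ V) :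
    unvis U vis = unvis V vis := by
  unfold unvis; congr 1; ext w
  simp only [Finset.mem_filter, List.mem_toFinset, h w]

lemma unvis_mono (U V vis : List String) (h : ∀ w, w ∈ U → w ∈ V) :
    unvis U vis ≤ unvis V vis := by
  unfold unvis
  exact Finset.card_le_card (Finset.filter_subset_filter _ (by
    intro w hw; simp only [List.mem_toFinset] at *; exact h w hw))

-- ===== PORT A =====
def isAdjacent (w1 w2 : String) : Bool :=
  ((w1.toList.zip w2.toList).foldl
    (fun diff_count p => diff_count + (if p.1 != p.2 then (1 : Int) else 0)) 0) == 1

mutual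
def dfs (node : String) (target : String) (dictionary : List String) (depth : Int) (max_depth : Int) (visited : List String) (path : List String) : Option (List String) :=
  if node == target then some (path ++ [node])
  else if depth == max_depth then none
  else
    dfsLoop node target dictionary depth max_depth
      (PySem.Set.add visited node) (path ++ [node]) dictionary
termination_by (2 * unvis (node :: dictionary) visited + (if node ∈ visited then 1 else 0), dictionary.length + 1)
decreasing_by
  have hdd := unvis_eq_of_mem_iff (dictionary ++ dictionary) dictionary
    (PySem.Set.add visited node) (by intro w; simp)
  by_cases hm : node ∈ visited
  · apply Prod.Lex.right'
    · rw [PySem.Set.add_of_mem hm] at hdd ⊢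
      rw [hdd, unvis_cons_of_mem node _ _ hm]
      simp [hm]
    · omega
  · apply Prod.Lex.left
    rw [PySem.Set.add_of_not_mem hm] at hdd ⊢
    rw [hdd, unvis_cons_of_not_mem node _ _ hm]
    simp only [hm, if_neg, ite_false]
    omega

def dfsLoop (node : String) (target : String) (dictionary : List String) (depth : Int) (max_depth : Int) (visited : List String) (path : List String) (ws : List String) : Option (List String) :=
  match ws with
  | [] => none
  | w :: rest =>
    if h : isAdjacent node w && !(PySem.Set.contains visited w) then
      match dfs w target dictionary (depth + 1) max_depth visited path with
      | some r => some r
      | none => dfsLoop node target dictionary depth max_depth visited path rest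
    else dfsLoop node target dictionary depth max_depth visited path rest
termination_by (2 * unvis (ws ++ dictionary) visited + 1, ws.length)
decreasing_by
  · apply Prod.Lex.left
    have hw : w ∉ visited := by
      simp only [Bool.and_eq_true, Bool.not_eq_true'] at h
      intro hmem
      rw [(PySem.Set.contains_iff visited w).mpr hmem] at h
      exact absurd h.2 (by simp)
    have h1 : unvis (w :: dictionary) visited ≤ unvis ((w :: rest) ++ dictionary) visited :=
      unvis_mono _ _ _ (by intro x hx; simp at hx ⊢; tauto)
    have : (if w ∈ visited then 1 else 0) = 0 := by simp [hw]
    omega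
  · apply Prod.Lex.right'
    · have := unvis_mono (rest ++ dictionary) ((w :: rest) ++ dictionary) visited
        (by intro x hx; simp at hx ⊢; tauto)
      omega
    · simp
  · apply Prod.Lex.right'
    · have := unvis_mono (rest ++ dictionary) ((w :: rest) ++ dictionary) visited
        (by intro x hx; simp at hx ⊢; tauto)
      omega
    · simp
end

-- ===== PORT B =====
def adjacentGo : List (Char × Char) → Nat → Bool
  | [], d => d == 1
  | p :: rest, d =>
    if p.1 != p.2 then
      (if d + 1 > 1 then false else adjacentGo rest (d + 1))
    else adjacentGo rest d

def adjacentB (w1 w2 : String) : Bool := adjacentGo (w1.toList.zip w2.toList) 0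

def buildAdj (dictionary : List String) : PySem.Dict String (List String) :=
  dictionary.foldl
    (fun adj w =>
      if adj.contains w then adj
      else adj.insert w (dictionary.filter (fun u => adjacentB w u)))
    PySem.Dict.empty

def neighborsB (adj : PySem.Dict String (List String)) (dictionary : List String) (w : String) : List String :=
  match adj.get? w with
  | some ns => ns
  | none => dictionary.filter (fun u => adjacentB w u)

lemma mem_flatten_of_get? (adj : PySem.Dict String (List String)) (w x : String) (ns : List String)
    (h : adj.get? w = some ns) (hx : x ∈ ns) : x ∈ adj.values.flatten := by
  have := PySem.Dict.mem_items_of_get?_eq_some (d := adj) (k := w) (v := ns) h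
  refine List.mem_flatten.mpr ⟨ns, ?_, hx⟩
  simp only [PySem.Dict.values, List.mem_map]
  exact ⟨(w, ns), this, rfl⟩

lemma neighborsB_subset (adj : PySem.Dict String (List String)) (dictionary : List String)
    (w x : String) (hx : x ∈ neighborsB adj dictionary w) :
    x ∈ adj.values.flatten ++ dictionary := by
  unfold neighborsB at hx
  rcases h : adj.get? w with _ | ns <;> rw [h] at hx
  · exact List.mem_append.mpr (Or.inr (List.mem_of_mem_filter hx))
  · exact List.mem_append.mpr (Or.inl (mem_flatten_of_get? adj w x ns h hx))

mutual
def searchB (target : String) (dictionary : List String) (adj : PySem.Dict String (List String)) (max_depth : Int) (w : String) (d : Int) (vis : List String) : Option (List String) :=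
  if w == target then some [w]
  else if d == max_depth then none
  else
    searchBLoop target dictionary adj max_depth w d
      (PySem.Set.add vis w) (neighborsB adj dictionary w)
termination_by (2 * unvis (w :: (adj.values.flatten ++ dictionary)) vis + (if w ∈ vis then 1 else 0), (neighborsB adj dictionary w).length + 1)
decreasing_by
  have hdd := unvis_eq_of_mem_iff (neighborsB adj dictionary w ++ (adj.values.flatten ++ dictionary))
    (adj.values.flatten ++ dictionary) (PySem.Set.add vis w) (by
      intro x
      constructor
      · intro hx
        rcases List.mem_append.mp hx with hx | hx
        · exact neighborsB_subset adj dictionary w x hx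
        · exact hx
      · intro hx; exact List.mem_append.mpr (Or.inr hx))
  by_cases hm : w ∈ vis
  · apply Prod.Lex.right'
    · rw [PySem.Set.add_of_mem hm] at hdd ⊢
      rw [hdd, unvis_cons_of_mem w _ _ hm]
      simp [hm]
    · omega
  · apply Prod.Lex.left
    rw [PySem.Set.add_of_not_mem hm] at hdd ⊢
    rw [hdd, unvis_cons_of_not_mem w _ _ hm]
    simp only [hm, ite_false]
    omega

def searchBLoop (target : String) (dictionary : List String) (adj : PySem.Dict String (List String)) (max_depth : Int) (w : String) (d : Int) (vis : List String) (ns : List String) : Option (List String) :=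
  match ns with
  | [] => none
  | u :: rest =>
    if hu : !(PySem.Set.contains vis u) then
      match searchB target dictionary adj max_depth u (d + 1) vis with
      | some s => some (w :: s)
      | none => searchBLoop target dictionary adj max_depth w d vis rest
    else searchBLoop target dictionary adj max_depth w d vis rest
termination_by (2 * unvis (ns ++ (adj.values.flatten ++ dictionary)) vis + 1, ns.length)
decreasing_by
  · apply Prod.Lex.left
    have hw : u ∉ vis := by
      simp only [Bool.not_eq_true'] at hu
      intro hmem
      rw [(PySem.Set.contains_iff vis u).mpr hmem] at hu
      exact absurd hu (by simp)
    have h1 : unvis (u :: (adj.values.flatten ++ dictionary)) vis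
        ≤ unvis ((u :: rest) ++ (adj.values.flatten ++ dictionary)) vis :=
      unvis_mono _ _ _ (by
        intro x hx; simp at hx ⊢
        rcases hx with h | h
        · exact Or.inl h
        · exact Or.inr (Or.inr h))
    have : (if u ∈ vis then 1 else 0) = 0 := by simp [hw]
    omega
  · apply Prod.Lex.right'
    · have := unvis_mono (rest ++ (adj.values.flatten ++ dictionary))
        ((u :: rest) ++ (adj.values.flatten ++ dictionary)) vis
        (by intro x hx; simp at hx ⊢; exact Or.inr hx)
      omega
    · simp
  · apply Prod.Lex.right'
    · have := unvis_mono (rest ++ (adj.values.flatten ++ dictionary))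
        ((u :: rest) ++ (adj.values.flatten ++ dictionary)) vis
        (by intro x hx; simp at hx ⊢; exact Or.inr hx)
      omega
    · simp
end

def dfs_alt (node : String) (target : String) (dictionary : List String) (depth : Int) (max_depth : Int) (visited : List String) (path : List String) : Option (List String) :=
  match searchB target dictionary (buildAdj dictionary) max_depth node depth visited with
  | none => none
  | some s => some (path ++ s)


-- ===== PRECONDITION & SPEC =====
def Spec_dfs (node : String) (target : String) (dictionary : List String) (depth : Int) (max_depth : Int) (visited : List String) (path : List String) (out : Option (List String)) : Prop := out = dfs_alt node target dictionary depth max_depth visited path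
instance (node : String) (target : String) (dictionary : List String) (depth : Int) (max_depth : Int) (visited : List String) (path : List String) (out : Option (List String)) : Decidable (Spec_dfs node target dictionary depth max_depth visited path out) := by unfold Spec_dfs; infer_instance

-- ===== CLAIM =====
def Claim_equal_dfs : Prop := ∀ (node : String) (target : String) (dictionary : List String) (depth : Int) (max_depth : Int) (visited : List String) (path : List String), Dom_dfs node target dictionary depth max_depth visited path → Spec_dfs node target dictionary depth max_depth visited path (dfs node target dictionary depth max_depth visited path)

-- ===== LEMMAS AND PROOFS =====
lemma foldl_diff_ge (l : List (Char × Char)) (a : Int) :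
    a ≤ l.foldl (fun acc p => acc + (if p.1 != p.2 then (1 : Int) else 0)) a := by
  induction l generalizing a with
  | nil => simp
  | cons p rest ih =>
    refine le_trans ?_ (ih (a + (if p.1 != p.2 then (1 : Int) else 0)))
    split <;> omega

lemma adjacentGo_eq (l : List (Char × Char)) (d : Nat) :
    adjacentGo l d
      = ((l.foldl (fun acc p => acc + (if p.1 != p.2 then (1 : Int) else 0)) (d : Int)) == 1) := by
  induction l generalizing d with
  | nil =>
    by_cases h : d = 1 <;> simp [adjacentGo, h] <;> omega
  | cons p rest ih =>
    rw [adjacentGo]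
    by_cases hp : (p.1 != p.2) = true
    · rw [if_pos hp]
      by_cases hd : d + 1 > 1
      · rw [if_pos hd]
        have hge := foldl_diff_ge rest ((d : Int) + 1)
        have h1 : ¬ (rest.foldl (fun acc p => acc + (if p.1 != p.2 then (1 : Int) else 0)) ((d : Int) + 1)) = 1 := by omega
        simp only [List.foldl_cons, hp, if_true, ite_true]
        symm
        simpa using h1
      · rw [if_neg hd]
        have hd0 : d = 0 := by omega
        subst hd0
        have := ih 1
        simp only [List.foldl_cons, hp, ite_true, if_true] at this ⊢
        simpa using this
    · rw [if_neg hp]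
      simp only [List.foldl_cons, hp]
      simpa using ih d

lemma adjacentB_eq (w1 w2 : String) : adjacentB w1 w2 = isAdjacent w1 w2 := by
  unfold adjacentB isAdjacent
  simpa using adjacentGo_eq (w1.toList.zip w2.toList) 0

lemma buildAdj_inv (D : List String) :
    ∀ (l : List String) (adj : PySem.Dict String (List String)),
      (∀ k v, adj.get? k = some v → v = D.filter (fun u => adjacentB k u)) →
      ∀ k v,
        (l.foldl
          (fun adj w =>
            if adj.contains w then adj
            else adj.insert w (D.filter (fun u => adjacentB w u))) adj).get? k = some v →
        v = D.filter (fun u => adjacentB k u) := by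
  intro l
  induction l with
  | nil => intro adj hinv k v h; exact hinv k v h
  | cons w rest ih =>
    intro adj hinv k v h
    refine ih _ ?_ k v h
    intro k' v' h'
    have h2 : (if adj.contains w then adj
        else adj.insert w (D.filter (fun u => adjacentB w u))).get? k' = some v' := h'
    clear h'
    by_cases hc : adj.contains w
    · rw [if_pos hc] at h2; exact hinv k' v' h2
    · rw [if_neg hc, PySem.Dict.get?_insert] at h2
      by_cases hk : k' = w
      · rw [if_pos hk] at h2
        cases h2; subst hk; rfl
      · rw [if_neg hk] at h2
        exact hinv k' v' h2

lemma neighborsB_eq (D : List String) (w : String) :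
    neighborsB (buildAdj D) D w = D.filter (fun u => adjacentB w u) := by
  unfold neighborsB
  rcases h : (buildAdj D).get? w with _ | ns
  · rfl
  · exact buildAdj_inv D D PySem.Dict.empty (by intro k v hv; simp [PySem.Dict.get?_empty] at hv) w ns h

lemma main_eq (n : Nat) :
    (∀ (node target : String) (D : List String) (depth md : Int) (vis path : List String),
        2 * unvis (node :: D) vis + (if node ∈ vis then 1 else 0) ≤ n →
        dfs node target D depth md vis path
          = Option.map (fun s => path ++ s) (searchB target D (buildAdj D) md node depth vis)) ∧
    (∀ (node target : String) (D : List String) (depth md : Int) (vis path ws : List String),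
        2 * unvis (ws ++ D) vis + 1 ≤ n →
        dfsLoop node target D depth md vis (path ++ [node]) ws
          = Option.map (fun s => path ++ s)
              (searchBLoop target D (buildAdj D) md node depth vis
                (ws.filter (fun w => adjacentB node w)))) := by
  induction n using Nat.strong_induction_on with
  | _ n IH =>
  have hL : ∀ (node target : String) (D : List String) (depth md : Int) (vis path ws : List String),
      2 * unvis (ws ++ D) vis + 1 ≤ n →
      dfsLoop node target D depth md vis (path ++ [node]) ws
        = Option.map (fun s => path ++ s)
            (searchBLoop target D (buildAdj D) md node depth vis
              (ws.filter (fun w => adjacentB node w))) := by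
    intro node target D depth md vis path ws
    induction ws with
    | nil =>
      intro _
      rw [dfsLoop]
      simp [searchBLoop]
    | cons w rest ihws =>
      intro hb
      have hmono : unvis (rest ++ D) vis ≤ unvis ((w :: rest) ++ D) vis :=
        unvis_mono _ _ _ (by intro x hx; simp at hx ⊢; exact Or.inr hx)
      have hbrest : 2 * unvis (rest ++ D) vis + 1 ≤ n := by omega
      rw [dfsLoop]
      by_cases hadj : adjacentB node w = true
      · have hadj' : isAdjacent node w = true := by rw [← adjacentB_eq]; exact hadj
        rw [List.filter_cons_of_pos (by simpa using hadj)]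
        by_cases hvis : PySem.Set.contains vis w = true
        · have hw' : w ∈ vis := (PySem.Set.contains_iff vis w).mp hvis
          rw [dif_neg (by simp [hadj', hw'])]
          rw [searchBLoop, dif_neg (by simp [hw'])]
          exact ihws hbrest
        · have hw : w ∉ vis := by
            intro hmem
            exact absurd ((PySem.Set.contains_iff vis w).mpr hmem) hvis
          have hwD : unvis (w :: D) vis ≤ unvis ((w :: rest) ++ D) vis :=
            unvis_mono _ _ _ (by
              intro x hx; simp at hx ⊢
              rcases hx with h | h
              · exact Or.inl h
              · exact Or.inr (Or.inr h))
          have hchild : 2 * unvis (w :: D) vis + (if w ∈ vis then 1 else 0) ≤ n - 1 := by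
            simp only [hw, ite_false]
            omega
          have hn1 : n - 1 < n := by omega
          have hSA := (IH (n - 1) hn1).1 w target D (depth + 1) md vis (path ++ [node]) hchild
          rw [dif_pos (by simp [hadj', hw]), hSA]
          rw [searchBLoop, dif_pos (by simp [hw])]
          cases hs : searchB target D (buildAdj D) md w (depth + 1) vis with
          | none => simpa using ihws hbrest
          | some s => simp
      · have hadj' : isAdjacent node w = false := by
          rw [← adjacentB_eq]; exact (Bool.not_eq_true _).mp hadj
        rw [dif_neg (by simp [hadj']), List.filter_cons_of_neg (by simpa using hadj)]
        exact ihws hbrest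
  refine ⟨?_, hL⟩
  intro node target D depth md vis path hb
  rw [dfs, searchB]
  by_cases h1 : (node == target) = true
  · simp [h1]
  · rw [if_neg h1, if_neg h1]
    by_cases h2 : (depth == md) = true
    · simp [h2]
    · rw [if_neg h2, if_neg h2, neighborsB_eq]
      have hdd := unvis_eq_of_mem_iff (D ++ D) D (PySem.Set.add vis node) (by intro x; simp)
      have hbloop : 2 * unvis (D ++ D) (PySem.Set.add vis node) + 1 ≤ n := by
        by_cases hm : node ∈ vis
        · rw [PySem.Set.add_of_mem hm] at hdd ⊢
          rw [hdd]
          have := unvis_cons_of_mem node D vis hm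
          simp only [hm, ite_true] at hb
          omega
        · rw [PySem.Set.add_of_not_mem hm] at hdd ⊢
          rw [hdd]
          have := unvis_cons_of_not_mem node D vis hm
          omega
      exact hL node target D depth md (PySem.Set.add vis node) path D hbloop

-- ===== VERDICT =====
theorem dfs_spec : Claim_equal_dfs := by
  intro node target dictionary depth max_depth visited path _
  unfold Spec_dfs dfs_alt
  rw [(main_eq (2 * unvis (node :: dictionary) visited + (if node ∈ visited then 1 else 0))).1
      node target dictionary depth max_depth visited path le_rfl]
  cases hs : searchB target dictionary (buildAdj dictionary) max_depth node depth visited <;> simp [hs]
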